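-- pv_equiv track=rewrite | github.com/marty191189/SoftUni-Courses | Python Advanced 05.2022/Workshop/tic_tac_toe_game.py | get_positions_mapping
-- ===== SOURCE A (Python) =====
-- def get_positions_mapping(board_1):
--
--     result = {}
--
--     index = 1
--
--     for row in range(len(board_1)):
--
--         for col in range(len(board_1)):
--
--             result[index] = (row, col)
--             index += 1
--
--     return result
-- ===== SOURCE B (Python) =====
-- def get_positions_mapping(board_1):
--     def coords(rows, r):
--         # structural recursion over the board's rows
--         if not rows:
--             return []
--         return [(r, c) for c in range(len(board_1))] + coords(rows[1:], r + 1)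
--     cs = coords(board_1, 0)
--     return dict(zip(range(1, len(cs) + 1), cs))
-- ===== Notes on version B (the rewrite author's own statement) =====
-- stated objective: alternative
-- what changed: Replaced the nested index loops with a mutated counter and incremental dict insertion by structural recursion over the board's rows building the coordinate list, with keys attached afterwards by zipping a 1-based range and constructing the dict in one shot from the pairs.
import Mathlib
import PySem

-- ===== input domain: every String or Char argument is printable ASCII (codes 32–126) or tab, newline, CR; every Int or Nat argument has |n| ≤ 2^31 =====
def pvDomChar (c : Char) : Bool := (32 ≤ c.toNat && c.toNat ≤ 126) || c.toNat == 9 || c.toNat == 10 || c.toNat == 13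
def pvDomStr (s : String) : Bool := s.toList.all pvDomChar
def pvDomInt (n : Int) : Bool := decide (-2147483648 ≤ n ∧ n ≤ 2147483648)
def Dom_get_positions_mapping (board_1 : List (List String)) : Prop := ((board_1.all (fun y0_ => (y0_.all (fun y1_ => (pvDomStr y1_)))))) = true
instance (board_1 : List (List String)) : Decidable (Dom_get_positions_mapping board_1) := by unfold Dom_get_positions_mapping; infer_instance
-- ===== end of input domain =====

-- B drops the nested index loops with a mutated counter and incremental dict insertion:
-- it builds the coordinate list by structural recursion over the board's rows, then
-- attaches the 1-based keys by zipping a range and builds the dict once from the pairs.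

-- ===== PORT A =====
def get_positions_mapping (board_1 : List (List String)) : List (Int × Int × Int) :=
  let st := (PySem.List.pyRange 0 (PySem.List.len board_1) 1).foldl
    (fun (st : PySem.Dict Int (Int × Int) × Int) row =>
      (PySem.List.pyRange 0 (PySem.List.len board_1) 1).foldl
        (fun st col => (st.1.insert st.2 (row, col), st.2 + 1)) st)
    (PySem.Dict.empty, 1)
  st.1.items

-- ===== PORT B =====
-- coords(rows, r): structural recursion over the remaining rows
def pvCoordsB (n : Int) : List (List String) → Int → List (Int × Int)
  | [], _ => []
  | _ :: rs, r => (PySem.List.pyRange 0 n 1).map (fun c => (r, c)) ++ pvCoordsB n rs (r + 1)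

-- dict(zip(range(1, len(cs)+1), cs)): the dict constructor inserts the pairs in order
def get_positions_mapping_alt (board_1 : List (List String)) : List (Int × Int × Int) :=
  let cs := pvCoordsB (PySem.List.len board_1) board_1 0
  (((PySem.List.pyRange 1 (PySem.List.len cs + 1) 1).zip cs).foldl
     (fun (d : PySem.Dict Int (Int × Int)) p => d.insert p.1 p.2) PySem.Dict.empty).items

-- ===== PRECONDITION & SPEC =====
def Spec_get_positions_mapping (board_1 : List (List String)) (out : List (Int × Int × Int)) : Prop := out = get_positions_mapping_alt board_1
instance (board_1 : List (List String)) (out : List (Int × Int × Int)) : Decidable (Spec_get_positions_mapping board_1 out) := by unfold Spec_get_positions_mapping; infer_instance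

-- ===== CLAIM (what is proved, stated in full; the proofs are below) =====
def Claim_equal_get_positions_mapping : Prop := ∀ (board_1 : List (List String)), Dom_get_positions_mapping board_1 → Spec_get_positions_mapping board_1 (get_positions_mapping board_1)

-- ===== LEMMAS AND PROOFS =====

-- A's inner column loop: appends enumerated (row, col) pairs, advances the counter
theorem pv_inner_fold (row : Int) (cols : List Int) :
    ∀ (d : PySem.Dict Int (Int × Int)) (idx : Int),
    (∀ k ∈ d.keys, k < idx) →
    (cols.foldl (fun st col => (st.1.insert st.2 (row, col), st.2 + 1)) (d, idx)).1.items
        = d.items ++ PySem.List.enumerate (cols.map (fun c => (row, c))) idx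
    ∧ (cols.foldl (fun st col => (st.1.insert st.2 (row, col), st.2 + 1)) (d, idx)).2
        = idx + cols.length
    ∧ (∀ k ∈ (cols.foldl (fun st col => (st.1.insert st.2 (row, col), st.2 + 1)) (d, idx)).1.keys,
        k < (cols.foldl (fun st col => (st.1.insert st.2 (row, col), st.2 + 1)) (d, idx)).2) := by
  induction cols with
  | nil => intro d idx hb; simp [PySem.List.enumerate_nil]; exact hb
  | cons c cs ih =>
    intro d idx hb
    have hnc : d.contains idx = false := by
      by_contra h
      have ht : d.contains idx = true := by revert h; cases d.contains idx <;> simp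
      have : idx ∈ d.keys := (PySem.Dict.contains_iff_mem_keys d idx).1 ht
      exact absurd (hb _ this) (lt_irrefl idx)
    have hitems := PySem.Dict.items_insert_of_not_contains (d := d) (k := idx) (v := (row, c)) hnc
    have hkeys := PySem.Dict.keys_insert_of_not_contains (d := d) (k := idx) (v := (row, c)) hnc
    have hb' : ∀ k ∈ (d.insert idx (row, c)).keys, k < idx + 1 := by
      intro k hk
      rw [hkeys] at hk
      rcases List.mem_append.1 hk with h | h
      · exact lt_trans (hb _ h) (by omega)
      · simp at h; omega
    obtain ⟨h1, h2, h3⟩ := ih (d.insert idx (row, c)) (idx + 1) hb'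
    refine ⟨?_, ?_, ?_⟩
    · simp only [List.foldl_cons]
      rw [h1, hitems, List.map_cons, PySem.List.enumerate_cons]
      simp
    · simp only [List.foldl_cons]
      rw [h2]; simp; omega
    · simpa only [List.foldl_cons] using h3

-- A's outer row loop: concatenates the per-row blocks, enumerated from idx
theorem pv_outer_fold (cols : List Int) (rows : List Int) :
    ∀ (d : PySem.Dict Int (Int × Int)) (idx : Int),
    (∀ k ∈ d.keys, k < idx) →
    (rows.foldl (fun st row => cols.foldl
        (fun st col => (st.1.insert st.2 (row, col), st.2 + 1)) st) (d, idx)).1.items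
      = d.items ++ PySem.List.enumerate
          (rows.flatMap (fun r => cols.map (fun c => (r, c)))) idx := by
  induction rows with
  | nil => intro d idx _; simp [PySem.List.enumerate_nil]
  | cons r rs ih =>
    intro d idx hb
    obtain ⟨h1, h2, h3⟩ := pv_inner_fold r cols d idx hb
    have g1 := ih
      (cols.foldl (fun st col => (st.1.insert st.2 (r, col), st.2 + 1)) (d, idx)).1
      (cols.foldl (fun st col => (st.1.insert st.2 (r, col), st.2 + 1)) (d, idx)).2 h3
    simp only [Prod.mk.eta] at g1
    simp only [List.foldl_cons]
    rw [g1, h1, h2, List.flatMap_cons, PySem.List.enumerate_append, List.length_map,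
      List.append_assoc]

-- B's recursion over the rows produces the same row-major coordinate list
theorem pv_coordsB_eq (n : Int) :
    ∀ (L : List (List String)) (r : Int),
    pvCoordsB n L r
      = (PySem.List.pyRange r (r + L.length) 1).flatMap
          (fun row => (PySem.List.pyRange 0 n 1).map (fun c => (row, c))) := by
  intro L
  induction L with
  | nil => intro r; simp [pvCoordsB]
  | cons x xs ih =>
    intro r
    have hlt : r < r + ((x :: xs).length : Int) := by push_cast [List.length_cons]; omega
    rw [PySem.List.pyRange_one_cons hlt]
    simp only [pvCoordsB, List.flatMap_cons, ih (r + 1), List.length_cons]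
    congr 2
    push_cast [List.length_cons]
    ring_nf

-- zipping a range of fresh keys is enumeration
theorem pv_zip_range_enumerate {α : Type} :
    ∀ (cs : List α) (s : Int),
    (PySem.List.pyRange s (s + cs.length) 1).zip cs = PySem.List.enumerate cs s := by
  intro cs
  induction cs with
  | nil => intro s; simp [PySem.List.enumerate_nil]
  | cons x xs ih =>
    intro s
    have hlt : s < s + ((x :: xs).length : Int) := by push_cast [List.length_cons]; omega
    rw [PySem.List.pyRange_one_cons hlt]
    have harg : s + ((x :: xs).length : Int) = (s + 1) + (xs.length : Int) := by push_cast [List.length_cons]; ring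
    rw [harg]
    simp only [List.zip_cons_cons, PySem.List.enumerate_cons, ih (s + 1)]

-- folding dict-insert over pairs with strictly increasing fresh keys lists them in order
theorem pv_fold_insert_enumerate {α : Type} :
    ∀ (cs : List α) (d : PySem.Dict Int α) (s : Int),
    (∀ k ∈ d.keys, k < s) →
    ((PySem.List.enumerate cs s).foldl
        (fun (d : PySem.Dict Int α) p => d.insert p.1 p.2) d).items
      = d.items ++ PySem.List.enumerate cs s := by
  intro cs
  induction cs with
  | nil => intro d s _; simp [PySem.List.enumerate_nil]
  | cons x xs ih =>
    intro d s hb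
    have hnc : d.contains s = false := by
      by_contra h
      have ht : d.contains s = true := by revert h; cases d.contains s <;> simp
      have : s ∈ d.keys := (PySem.Dict.contains_iff_mem_keys d s).1 ht
      exact absurd (hb _ this) (lt_irrefl s)
    have hb' : ∀ k ∈ (d.insert s x).keys, k < s + 1 := by
      intro k hk
      rw [PySem.Dict.keys_insert_of_not_contains (d := d) (k := s) (v := x) hnc] at hk
      rcases List.mem_append.1 hk with h | h
      · exact lt_trans (hb _ h) (by omega)
      · simp at h; omega
    rw [PySem.List.enumerate_cons]
    simp only [List.foldl_cons]
    rw [ih (d.insert s x) (s + 1) hb',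
      PySem.Dict.items_insert_of_not_contains (d := d) (k := s) (v := x) hnc,
      List.append_assoc]
    rfl

-- ===== VERDICT (by name: the statement is the Claim_ definition above) =====
theorem get_positions_mapping_spec : Claim_equal_get_positions_mapping := by
  intro board_1 _
  unfold Spec_get_positions_mapping get_positions_mapping get_positions_mapping_alt
  -- A side
  have hA := pv_outer_fold (PySem.List.pyRange 0 (PySem.List.len board_1) 1)
    (PySem.List.pyRange 0 (PySem.List.len board_1) 1) PySem.Dict.empty 1 (by simp)
  have hemp : (PySem.Dict.empty : PySem.Dict Int (Int × Int)).items = [] := rfl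
  simp only [hA, hemp, List.nil_append]
  -- the coordinate lists coincide
  have hlen : PySem.List.len board_1 = (board_1.length : Int) := by simp [PySem.List.len_eq]
  have hcs : pvCoordsB (PySem.List.len board_1) board_1 0
      = (PySem.List.pyRange 0 (PySem.List.len board_1) 1).flatMap
          (fun row => (PySem.List.pyRange 0 (PySem.List.len board_1) 1).map (fun c => (row, c))) := by
    rw [pv_coordsB_eq]
    congr 1
    rw [hlen]; ring_nf
  set cs := pvCoordsB (PySem.List.len board_1) board_1 0 with hcsdef
  have hlcs : PySem.List.len cs = (cs.length : Int) := by simp [PySem.List.len_eq]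
  have hzip : (PySem.List.pyRange 1 (PySem.List.len cs + 1) 1).zip cs
      = PySem.List.enumerate cs 1 := by
    rw [hlcs, show (cs.length : Int) + 1 = 1 + (cs.length : Int) by ring]
    exact pv_zip_range_enumerate cs 1
  rw [hzip, pv_fold_insert_enumerate cs PySem.Dict.empty 1 (by simp), hemp, List.nil_append, hcs]
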